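-- pv_equiv track=rewrite | github.com/King-s-Knowledge-Graph-Lab/WQT_ToolKit | WDV_pipeline.py | get_subclass_root
-- ===== SOURCE A (Python) =====
-- flat_subclass_mapping = {}
--
-- def get_subclass_root(entity_id, flat_subclass_mapping=flat_subclass_mapping, at_level=None):
--     try:
--         #pdb.set_trace()
--         overlapping_cases = {'Q41176':False,'Q1248784':False,'Q2095':False,'Q16521':False}
--         for k in flat_subclass_mapping.keys():
--             if at_level:
--                 subclasses_entity_ids = [e[0] for e in flat_subclass_mapping[k] if e[2] == at_level[k]]
--             else:
--                 subclasses_entity_ids = [e[0] for e in flat_subclass_mapping[k]]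
--             if entity_id in subclasses_entity_ids:
--                 if k not in overlapping_cases.keys():
--                     return k
--                 else:
--                     overlapping_cases[k] = True
--
--         if overlapping_cases['Q41176'] or overlapping_cases['Q1248784']:
--             if overlapping_cases['Q1248784']: #Airport
--                 return 'Q1248784' #Airport
--             else:
--                 return 'Q41176'#Building
--
--         if overlapping_cases['Q2095'] or overlapping_cases['Q16521']:
--             if overlapping_cases['Q16521']: #Taxon
--                 return 'Q16521' #Taxon
--             else:
--                 return 'Q2095'#Food
--
--         return 'NONE'
--     except ValueError as e:
--         return 'ERROR: '+str(e)
-- ===== SOURCE B (Python) =====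
-- flat_subclass_mapping = {}
--
-- OVERLAP_PRIORITY = {'Q1248784': 0, 'Q41176': 1, 'Q16521': 2, 'Q2095': 3}
--
-- def get_subclass_root(entity_id, flat_subclass_mapping=flat_subclass_mapping, at_level=None):
--     # One sweep over every entry builds an inverted index: entity id -> the
--     # ordered list of root keys whose (level-filtered) entries contain it.
--     index = {}
--     for k, entries in flat_subclass_mapping.items():
--         for e in entries:
--             if at_level and e[2] != at_level[k]:
--                 continue
--             ks = index.setdefault(e[0], [])
--             if not ks or ks[-1] != k:
--                 ks.append(k)
--     matches = index.get(entity_id, [])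
--     # First matching root that is not an overlapping case wins outright.
--     for k in matches:
--         if k not in OVERLAP_PRIORITY:
--             return k
--     # Otherwise the overlapping root of highest precedence (lowest rank).
--     if matches:
--         return min(matches, key=OVERLAP_PRIORITY.__getitem__)
--     return 'NONE'
-- ===== Notes on version B (the rewrite author's own statement) =====
-- stated objective: alternative
-- what changed: B replaces A's per-key membership scan with mutable overlap flags and an if-cascade by a different data structure and pass order: one sweep over all entries builds an inverted index (entity id -> ordered list of matching root keys) so there is no per-key membership test at all, then the answer is a single lookup followed by first-non-overlap selection or a min-by-priority over the overlapping matches.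
import Mathlib
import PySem

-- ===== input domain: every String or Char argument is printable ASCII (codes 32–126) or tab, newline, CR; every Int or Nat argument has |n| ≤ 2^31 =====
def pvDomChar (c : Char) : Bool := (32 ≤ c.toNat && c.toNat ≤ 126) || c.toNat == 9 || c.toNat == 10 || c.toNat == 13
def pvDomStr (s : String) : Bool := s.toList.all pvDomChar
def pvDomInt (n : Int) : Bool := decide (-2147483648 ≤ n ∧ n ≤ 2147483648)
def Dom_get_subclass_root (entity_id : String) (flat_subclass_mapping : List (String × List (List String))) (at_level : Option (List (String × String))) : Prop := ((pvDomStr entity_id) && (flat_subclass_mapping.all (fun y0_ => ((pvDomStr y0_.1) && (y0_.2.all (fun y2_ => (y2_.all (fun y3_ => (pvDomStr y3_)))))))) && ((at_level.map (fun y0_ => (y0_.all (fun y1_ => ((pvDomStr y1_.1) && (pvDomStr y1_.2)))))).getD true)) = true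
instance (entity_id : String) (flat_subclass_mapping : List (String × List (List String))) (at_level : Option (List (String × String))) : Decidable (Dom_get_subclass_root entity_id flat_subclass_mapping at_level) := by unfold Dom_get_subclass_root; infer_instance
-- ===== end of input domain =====

-- B replaces A's per-key membership scan with flag state by an inverted index (entity id ->
-- ordered matching root keys) built in one sweep, then lookup + min-by-priority selection;
-- equivalence is about the return value on Pre_ (no observable side effects involved).

-- ===== PORT A =====
-- subclasses_entity_ids of one key: [e[0] for e in entries (if e[2] == at_level[k])]
def gsrIdsA (entries : List (List String)) (at_level : Option (List (String × String))) (k : String) : List String :=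
  match at_level with
  | some l =>
      if l = [] then entries.map (fun e => (PySem.List.pyGet? e 0).getD "")
      else (entries.filter (fun e => PySem.List.pyGet? e 2 == (PySem.Dict.mk l).get? k)).map
             (fun e => (PySem.List.pyGet? e 0).getD "")
  | none => entries.map (fun e => (PySem.List.pyGet? e 0).getD "")

-- A's for-loop over the dict keys, threading the overlapping_cases flag dict
def gsrLoopA (entity_id : String) (fm : List (String × List (List String))) (at_level : Option (List (String × String))) : List String → PySem.Dict String Bool → String
  | [], oc =>
      if oc.getD "Q41176" false || oc.getD "Q1248784" false then
        if oc.getD "Q1248784" false then "Q1248784" else "Q41176"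
      else if oc.getD "Q2095" false || oc.getD "Q16521" false then
        if oc.getD "Q16521" false then "Q16521" else "Q2095"
      else "NONE"
  | k :: ks, oc =>
      let entries := ((PySem.Dict.mk fm).get? k).getD []
      let ids := gsrIdsA entries at_level k
      if entity_id ∈ ids then
        if oc.contains k then gsrLoopA entity_id fm at_level ks (oc.insert k true)
        else k
      else gsrLoopA entity_id fm at_level ks oc

def get_subclass_root (entity_id : String) (flat_subclass_mapping : List (String × List (List String))) (at_level : Option (List (String × String))) : String :=
  gsrLoopA entity_id flat_subclass_mapping at_level (flat_subclass_mapping.map Prod.fst)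
    (PySem.Dict.mk [("Q41176", false), ("Q1248784", false), ("Q2095", false), ("Q16521", false)])

-- ===== PORT B =====
-- OVERLAP_PRIORITY
def gsrPrio : PySem.Dict String Int := PySem.Dict.mk [("Q1248784", 0), ("Q41176", 1), ("Q16521", 2), ("Q2095", 3)]

-- 'if at_level and e[2] != at_level[k]: continue' — keep = not skipped
def gsrKeep (at_level : Option (List (String × String))) (k : String) (e : List String) : Bool :=
  match at_level with
  | some l => if l = [] then true else (PySem.List.pyGet? e 2 == (PySem.Dict.mk l).get? k)
  | none => true

-- body of the entry loop: ks = index.setdefault(e[0], []); if not ks or ks[-1] != k: ks.append(k)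
def gsrStep (at_level : Option (List (String × String))) (k : String)
    (idx : PySem.Dict String (List String)) (e : List String) : PySem.Dict String (List String) :=
  if gsrKeep at_level k e then
    let h := (PySem.List.pyGet? e 0).getD ""
    let ks := idx.getD h []
    idx.insert h (if ks.getLast? == some k then ks else ks ++ [k])
  else idx

-- min(matches, key=OVERLAP_PRIORITY.__getitem__): first element of minimal rank
-- (the 0 default of getD is unreachable: min is only taken over overlapping keys)
def gsrMinBy (best : String) (xs : List String) : String :=
  match xs with
  | [] => best
  | x :: rest => if gsrPrio.getD x 0 < gsrPrio.getD best 0 then gsrMinBy x rest else gsrMinBy best rest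

def get_subclass_root_alt (entity_id : String) (flat_subclass_mapping : List (String × List (List String))) (at_level : Option (List (String × String))) : String :=
  let idx := flat_subclass_mapping.foldl (fun idx kv => kv.2.foldl (gsrStep at_level kv.1) idx) PySem.Dict.empty
  let ms := idx.getD entity_id []
  match ms.find? (fun k => !(gsrPrio.contains k)) with
  | some k => k
  | none =>
      match ms with
      | [] => "NONE"
      | m :: rest => gsrMinBy m rest

-- ===== PRECONDITION & SPEC =====
-- Pre_ excludes (a) association lists with duplicate keys (either dict), which do not correspond to
-- any Python dict input, and (b) inputs on which the Python evaluation raises — an entry e with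
-- len(e) < 3 (IndexError on e[2]) or a mapping key missing from a truthy at_level (KeyError) or an
-- empty entry e (IndexError on e[0]); because A returns at its first non-overlapping match it can
-- return on some such malformed inputs where B's full sweep raises, so all of them are excluded.
def Pre_get_subclass_root (entity_id : String) (flat_subclass_mapping : List (String × List (List String))) (at_level : Option (List (String × String))) : Prop :=
  (flat_subclass_mapping.map Prod.fst).Nodup ∧
  ((at_level.getD []).map Prod.fst).Nodup ∧
  (if at_level.getD [] = []
   then ∀ kv ∈ flat_subclass_mapping, ∀ e ∈ kv.2, e ≠ []
   else ∀ kv ∈ flat_subclass_mapping,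
          (∀ e ∈ kv.2, 3 ≤ e.length) ∧ (kv.2 ≠ [] → kv.1 ∈ (at_level.getD []).map Prod.fst))
instance (entity_id : String) (flat_subclass_mapping : List (String × List (List String))) (at_level : Option (List (String × String))) : Decidable (Pre_get_subclass_root entity_id flat_subclass_mapping at_level) := by unfold Pre_get_subclass_root; infer_instance

def pvWitness_get_subclass_root : String × (List (String × List (List String))) × (Option (List (String × String))) :=
  ("Q5", [("Q41176", [["Q5", "x", "L1"]]), ("Q99", [["Q7", "y", "L1"]])], some [("Q41176", "L1"), ("Q99", "L1")])

def Spec_get_subclass_root (entity_id : String) (flat_subclass_mapping : List (String × List (List String))) (at_level : Option (List (String × String))) (out : String) : Prop := out = get_subclass_root_alt entity_id flat_subclass_mapping at_level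
instance (entity_id : String) (flat_subclass_mapping : List (String × List (List String))) (at_level : Option (List (String × String))) (out : String) : Decidable (Spec_get_subclass_root entity_id flat_subclass_mapping at_level out) := by unfold Spec_get_subclass_root; infer_instance

-- ===== CLAIM (what is proved, stated in full; the proofs are below) =====
def Claim_equal_get_subclass_root : Prop := ∀ (entity_id : String) (flat_subclass_mapping : List (String × List (List String))) (at_level : Option (List (String × String))), Dom_get_subclass_root entity_id flat_subclass_mapping at_level → Pre_get_subclass_root entity_id flat_subclass_mapping at_level → Spec_get_subclass_root entity_id flat_subclass_mapping at_level (get_subclass_root entity_id flat_subclass_mapping at_level)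

-- ===== LEMMAS AND PROOFS =====

def gsrOverlapKeys : List String := ["Q41176", "Q1248784", "Q2095", "Q16521"]

-- whether key k's (filtered) entity ids contain entity_id, in A's phrasing
def gsrHitB (entity_id : String) (entries : List (List String)) (at_level : Option (List (String × String))) (k : String) : Bool :=
  match at_level with
  | some l =>
      if l = [] then entries.any (fun e => (PySem.List.pyGet? e 0).getD "" == entity_id)
      else (entries.filter (fun e => PySem.List.pyGet? e 2 == (PySem.Dict.mk l).get? k)).any
             (fun e => (PySem.List.pyGet? e 0).getD "" == entity_id)
  | none => entries.any (fun e => (PySem.List.pyGet? e 0).getD "" == entity_id)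

-- the same hit, in B's per-entry phrasing
def gsrHitX (x : String) (at_level : Option (List (String × String))) (k : String) (es : List (List String)) : Bool :=
  es.any (fun e => gsrKeep at_level k e && ((PySem.List.pyGet? e 0).getD "" == x))

-- A's final if-cascade as a function of the flag valuation
def gsrTail (f : String → Bool) : String :=
  if f "Q41176" || f "Q1248784" then
    if f "Q1248784" then "Q1248784" else "Q41176"
  else if f "Q2095" || f "Q16521" then
    if f "Q16521" then "Q16521" else "Q2095"
  else "NONE"

-- what A computes from flags oc and the (remaining) matches ms
def gsrSelect (oc : PySem.Dict String Bool) (ms : List String) : String :=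
  match ms.find? (fun k => !(gsrOverlapKeys.contains k)) with
  | some k => k
  | none => gsrTail (fun x => oc.getD x false || ms.contains x)

theorem gsr_mem_any (entity_id : String) (xs : List (List String)) (f : List String → String) :
    (entity_id ∈ xs.map f) ↔ xs.any (fun e => f e == entity_id) = true := by
  simp [List.any_eq_true, List.mem_map, beq_iff_eq]

theorem gsr_mem_ids_iff (entity_id : String) (entries : List (List String)) (at_level : Option (List (String × String))) (k : String) :
    (entity_id ∈ gsrIdsA entries at_level k) ↔ gsrHitB entity_id entries at_level k = true := by
  cases at_level with
  | none => exact gsr_mem_any _ _ _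
  | some l =>
      by_cases hl : l = [] <;> simp only [gsrIdsA, gsrHitB, hl, if_pos] <;>
        exact gsr_mem_any _ _ _

theorem gsrLoopA_eq_select (entity_id : String) (fm : List (String × List (List String))) (at_level : Option (List (String × String)))
    (ps : List (String × List (List String))) (oc : PySem.Dict String Bool)
    (hlk : ∀ kv ∈ ps, (PySem.Dict.mk fm).get? kv.1 = some kv.2)
    (hc : ∀ k, oc.contains k = gsrOverlapKeys.contains k) :
    gsrLoopA entity_id fm at_level (ps.map Prod.fst) oc
      = gsrSelect oc ((ps.filter (fun kv => gsrHitB entity_id kv.2 at_level kv.1)).map Prod.fst) := by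
  induction ps generalizing oc with
  | nil => simp [gsrLoopA, gsrSelect, gsrTail]
  | cons kv ps ih =>
      have hkv := hlk kv (by simp)
      have hlk' : ∀ p ∈ ps, (PySem.Dict.mk fm).get? p.1 = some p.2 := fun p hp => hlk p (by simp [hp])
      by_cases hhit : gsrHitB entity_id kv.2 at_level kv.1 = true
      · by_cases hov : kv.1 ∈ gsrOverlapKeys
        · -- overlapping key: flag it and continue
          have hcont : oc.contains kv.1 = true := by
            rw [hc]; simpa using hov
          have hmem : entity_id ∈ gsrIdsA kv.2 at_level kv.1 := (gsr_mem_ids_iff _ _ _ _).mpr hhit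
          have hc' : ∀ k, (oc.insert kv.1 true).contains k = gsrOverlapKeys.contains k := by
            intro k
            rw [PySem.Dict.contains_insert, hc]
            by_cases hk : k = kv.1
            · subst hk; simp [hcont ▸ hc kv.1]
            · simp [hk]
          have := ih (oc.insert kv.1 true) hlk' hc'
          simp only [List.map_cons, gsrLoopA, hkv, Option.getD_some, hmem, if_pos, hcont,
            List.filter_cons, hhit]
          rw [this]
          -- gsrSelect (oc.insert kv.1 true) ms' = gsrSelect oc (kv.1 :: ms')
          simp only [gsrSelect, List.find?]
          have hpred : (!(gsrOverlapKeys.contains kv.1)) = false := by simpa using hov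
          rw [hpred]
          cases hfind : ((ps.filter (fun kv => gsrHitB entity_id kv.2 at_level kv.1)).map Prod.fst).find? (fun k => !(gsrOverlapKeys.contains k)) with
          | some k => simp
          | none =>
              simp only
              have hfg : (fun x => (oc.insert kv.1 true).getD x false || ((ps.filter (fun kv => gsrHitB entity_id kv.2 at_level kv.1)).map Prod.fst).contains x)
                  = (fun x => oc.getD x false || (kv.1 :: (ps.filter (fun kv => gsrHitB entity_id kv.2 at_level kv.1)).map Prod.fst).contains x) := by
                funext x
                rw [PySem.Dict.getD_insert]
                by_cases hx : x = kv.1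
                · subst hx; simp
                · have hb : (x == kv.1) = false := beq_eq_false_iff_ne.mpr hx
                  simp [hx, hb]
              rw [hfg]
        · -- non-overlapping key: A returns it, B finds it first
          have hcont : oc.contains kv.1 = false := by
            rw [hc]; simpa using hov
          have hmem : entity_id ∈ gsrIdsA kv.2 at_level kv.1 := (gsr_mem_ids_iff _ _ _ _).mpr hhit
          have hpred : (!(gsrOverlapKeys.contains kv.1)) = true := by simpa using hov
          simp only [List.map_cons, gsrLoopA, hkv, Option.getD_some, hmem, if_pos, hcont,
            Bool.false_eq_true, if_false, List.filter_cons, hhit]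
          rw [gsrSelect, List.find?_cons_of_pos (p := fun k => !gsrOverlapKeys.contains k) hpred]
      · -- no hit: skip
        have hmem : entity_id ∉ gsrIdsA kv.2 at_level kv.1 := fun h => hhit ((gsr_mem_ids_iff _ _ _ _).mp h)
        simp only [List.map_cons, gsrLoopA, hkv, Option.getD_some, hmem, if_neg, not_false_iff,
          List.filter_cons, hhit]
        simp only [Bool.false_eq_true, if_false]
        exact ih oc hlk' hc

-- the inner entry loop of B: effect of one key's entries on any index cell
theorem gsrFoldEntries (at_level : Option (List (String × String))) (k : String) (es : List (List String)) :
    ∀ (idx : PySem.Dict String (List String)) (x : String),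
      (es.foldl (gsrStep at_level k) idx).getD x [] =
        if gsrHitX x at_level k es = true ∧ ¬ (idx.getD x []).getLast? = some k
        then idx.getD x [] ++ [k] else idx.getD x [] := by
  induction es with
  | nil => intro idx x; simp [gsrHitX]
  | cons e es ih =>
      intro idx x
      simp only [List.foldl_cons]
      by_cases hk : gsrKeep at_level k e = true
      · simp only [gsrStep, hk, if_pos]
        rw [ih]
        set h := (PySem.List.pyGet? e 0).getD "" with hdef
        by_cases hx : x = h
        · subst hx
          have hhit : gsrHitX h at_level k (e :: es) = true := by
            simp [gsrHitX, List.any_cons, hk, ← hdef]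
          have hins : (idx.insert h (if (idx.getD h []).getLast? == some k then idx.getD h [] else idx.getD h [] ++ [k])).getD h []
              = (if (idx.getD h []).getLast? == some k then idx.getD h [] else idx.getD h [] ++ [k]) := by
            rw [PySem.Dict.getD_insert]; simp
          rw [hins]
          by_cases hl : (idx.getD h []).getLast? = some k
          · have hb : ((idx.getD h []).getLast? == some k) = true := beq_iff_eq.mpr hl
            simp [hl, hhit]
          · have hb : ((idx.getD h []).getLast? == some k) = false := beq_eq_false_iff_ne.mpr hl
            have hlast : ((idx.getD h []) ++ [k]).getLast? = some k := by simp
            simp [hb, hl, hhit, hlast]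
        · have hins : (idx.insert h (if (idx.getD h []).getLast? == some k then idx.getD h [] else idx.getD h [] ++ [k])).getD x [] = idx.getD x [] := by
            rw [PySem.Dict.getD_insert]; simp [hx]
          rw [hins]
          have hhit : gsrHitX x at_level k (e :: es) = gsrHitX x at_level k es := by
            have hb : (h == x) = false := beq_eq_false_iff_ne.mpr (fun hh => hx hh.symm)
            simp [gsrHitX, List.any_cons, ← hdef, hb]
          rw [hhit]
      · simp only [gsrStep, hk, Bool.false_eq_true, if_false]
        rw [ih]
        have hhit : gsrHitX x at_level k (e :: es) = gsrHitX x at_level k es := by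
          simp only [Bool.not_eq_true] at hk
          simp [gsrHitX, List.any_cons, hk]
        rw [hhit]

-- the outer key loop of B: the index cell of entity_id collects the matching keys in order
theorem gsrFoldMap (eid : String) (at_level : Option (List (String × String))) :
    ∀ (fm : List (String × List (List String))) (idx : PySem.Dict String (List String)),
      (fm.map Prod.fst).Nodup → (∀ kv ∈ fm, kv.1 ∉ idx.getD eid []) →
      (fm.foldl (fun idx kv => kv.2.foldl (gsrStep at_level kv.1) idx) idx).getD eid []
        = idx.getD eid [] ++ (fm.filter (fun kv => gsrHitX eid at_level kv.1 kv.2)).map Prod.fst := by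
  intro fm
  induction fm with
  | nil => intro idx _ _; simp
  | cons kv fm ih =>
      intro idx hnd hfresh
      have hkv : kv.1 ∉ idx.getD eid [] := hfresh kv (by simp)
      have hlast : ¬ (idx.getD eid []).getLast? = some kv.1 := by
        intro h; exact hkv (List.mem_of_getLast? h)
      have h1 := gsrFoldEntries at_level kv.1 kv.2 idx eid
      simp only [List.foldl_cons]
      set idx1 := kv.2.foldl (gsrStep at_level kv.1) idx with hidx1
      have hcell : idx1.getD eid [] = idx.getD eid [] ++ (if gsrHitX eid at_level kv.1 kv.2 = true then [kv.1] else []) := by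
        rw [h1]
        by_cases hh : gsrHitX eid at_level kv.1 kv.2 = true <;> simp [hh, hlast]
      have hnd2 : kv.1 ∉ fm.map Prod.fst ∧ (fm.map Prod.fst).Nodup := by
        rw [List.map_cons] at hnd; exact List.nodup_cons.mp hnd
      have hnd' : (fm.map Prod.fst).Nodup := hnd2.2
      have hne : ∀ kv' ∈ fm, kv'.1 ≠ kv.1 := by
        intro kv' hkv' h
        exact hnd2.1 (h ▸ List.mem_map_of_mem hkv')
      have hfresh' : ∀ kv' ∈ fm, kv'.1 ∉ idx1.getD eid [] := by
        intro kv' hkv' hmem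
        rw [hcell] at hmem
        rcases List.mem_append.mp hmem with h | h
        · exact hfresh kv' (by simp [hkv']) h
        · by_cases hh : gsrHitX eid at_level kv.1 kv.2 = true
          · rw [if_pos hh] at h
            exact hne kv' hkv' (by simpa using h)
          · rw [if_neg hh] at h; simp at h
      rw [ih idx1 hnd' hfresh', hcell, List.filter_cons]
      by_cases hh : gsrHitX eid at_level kv.1 kv.2 = true <;> simp [hh]

-- the two phrasings of 'key k matches' agree
theorem gsrHitX_eq (eid : String) (at_level : Option (List (String × String))) (k : String) (es : List (List String)) :
    gsrHitX eid at_level k es = gsrHitB eid es at_level k := by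
  cases at_level with
  | none => simp [gsrHitX, gsrHitB, gsrKeep]
  | some l =>
      by_cases hl : l = []
      · simp [gsrHitX, gsrHitB, gsrKeep, hl]
      · simp only [gsrHitX, gsrHitB, gsrKeep, if_neg hl]
        rw [Bool.eq_iff_iff]
        simp only [List.any_eq_true, List.mem_filter, Bool.and_eq_true]
        tauto

-- B's priority dict contains exactly the overlap keys
theorem gsrPrio_contains (k : String) : gsrPrio.contains k = gsrOverlapKeys.contains k := by
  by_cases h1 : k = "Q1248784"
  · subst h1; decide
  by_cases h2 : k = "Q41176"
  · subst h2; decide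
  by_cases h3 : k = "Q16521"
  · subst h3; decide
  by_cases h4 : k = "Q2095"
  · subst h4; decide
  have b1 := beq_eq_false_iff_ne.mpr (Ne.symm h1)
  have b2 := beq_eq_false_iff_ne.mpr (Ne.symm h2)
  have b3 := beq_eq_false_iff_ne.mpr (Ne.symm h3)
  have b4 := beq_eq_false_iff_ne.mpr (Ne.symm h4)
  have c1 := beq_eq_false_iff_ne.mpr h1
  have c2 := beq_eq_false_iff_ne.mpr h2
  have c3 := beq_eq_false_iff_ne.mpr h3
  have c4 := beq_eq_false_iff_ne.mpr h4
  simp only [gsrPrio, gsrOverlapKeys, PySem.Dict.contains_mk, List.contains_eq_mem,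
    List.mem_cons, List.not_mem_nil, or_false]
  simp [h1, h2, h3, h4, b1, b2, b3, b4]

-- rank of a key under OVERLAP_PRIORITY (as B reads it)
def gsrRank (x : String) : Int := gsrPrio.getD x 0

theorem gsrMinBy_mem (xs : List String) : ∀ best, gsrMinBy best xs ∈ best :: xs := by
  induction xs with
  | nil => intro best; simp [gsrMinBy]
  | cons x xs ih =>
      intro best
      rw [gsrMinBy]
      split_ifs with h
      · have := ih x
        simp only [List.mem_cons] at this ⊢
        tauto
      · have := ih best
        simp only [List.mem_cons] at this ⊢
        tauto

theorem gsrMinBy_le (xs : List String) : ∀ best y, y ∈ best :: xs → gsrRank (gsrMinBy best xs) ≤ gsrRank y := by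
  induction xs with
  | nil =>
      intro best y hy
      simp only [List.mem_cons, List.not_mem_nil, or_false] at hy
      subst hy; simp [gsrMinBy]
  | cons x xs ih =>
      intro best y hy
      rw [gsrMinBy]
      simp only [List.mem_cons] at hy
      split_ifs with h
      · rcases hy with hy | hy | hy
        · calc gsrRank (gsrMinBy x xs) ≤ gsrRank x := ih x x (by simp)
            _ ≤ gsrRank y := by rw [hy]; exact le_of_lt (by simpa [gsrRank] using h)
        · exact ih x y (by simp [hy])
        · exact ih x y (by simp [hy])
      · rcases hy with hy | hy | hy
        · exact ih best y (by simp [hy])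
        · calc gsrRank (gsrMinBy best xs) ≤ gsrRank best := ih best best (by simp)
            _ ≤ gsrRank y := by rw [hy]; simpa [gsrRank] using le_of_not_gt h
        · exact ih best y (by simp [hy])

theorem gsrRank_inj (a b : String) (ha : a ∈ gsrOverlapKeys) (hb : b ∈ gsrOverlapKeys) (h : gsrRank a = gsrRank b) : a = b := by
  simp only [gsrOverlapKeys, List.mem_cons, List.not_mem_nil, or_false] at ha hb
  rcases ha with ha | ha | ha | ha <;> rcases hb with hb | hb | hb | hb <;>
    subst ha <;> subst hb <;> first | rfl | (exfalso; revert h; decide)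

-- on a nonempty all-overlap match list, A's flag cascade equals B's min-by-priority
theorem gsrTail_eq_minBy (m : String) (rest : List String)
    (hall : ∀ x ∈ m :: rest, x ∈ gsrOverlapKeys) :
    gsrTail (fun x => (m :: rest).contains x) = gsrMinBy m rest := by
  have hg := gsrMinBy_mem rest m
  have hg4 := hall _ hg
  have hm4 := hall m (List.mem_cons_self)
  simp only [gsrOverlapKeys, List.mem_cons, List.not_mem_nil, or_false] at hm4
  have key : ∀ (t : String), t ∈ m :: rest →
      (∀ y, y ∈ gsrOverlapKeys → y ∈ m :: rest → gsrRank t ≤ gsrRank y) → t = gsrMinBy m rest := by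
    intro t htm hmin
    exact gsrRank_inj t _ (hall _ htm) hg4 (le_antisymm (hmin _ hg4 hg) (gsrMinBy_le rest m t htm))
  by_cases c1 : "Q1248784" ∈ m :: rest
  · have ht : gsrTail (fun x => (m :: rest).contains x) = "Q1248784" := by
      simp [gsrTail, c1]
    rw [ht]
    apply key _ c1
    intro y hy4 _
    simp only [gsrOverlapKeys, List.mem_cons, List.not_mem_nil, or_false] at hy4
    rcases hy4 with h | h | h | h <;> subst h <;> decide
  · by_cases c2 : "Q41176" ∈ m :: rest
    · have ht : gsrTail (fun x => (m :: rest).contains x) = "Q41176" := by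
        simp [gsrTail, c1, c2]
      rw [ht]
      apply key _ c2
      intro y hy4 hym
      simp only [gsrOverlapKeys, List.mem_cons, List.not_mem_nil, or_false] at hy4
      rcases hy4 with h | h | h | h <;> subst h
      · decide
      · exact absurd hym c1
      · decide
      · decide
    · by_cases c3 : "Q16521" ∈ m :: rest
      · have ht : gsrTail (fun x => (m :: rest).contains x) = "Q16521" := by
          simp [gsrTail, c1, c2, c3]
        rw [ht]
        apply key _ c3
        intro y hy4 hym
        simp only [gsrOverlapKeys, List.mem_cons, List.not_mem_nil, or_false] at hy4
        rcases hy4 with h | h | h | h <;> subst h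
        · exact absurd hym c2
        · exact absurd hym c1
        · decide
        · decide
      · have c4 : "Q2095" ∈ m :: rest := by
          rcases hm4 with h | h | h | h
          · exact absurd (List.mem_cons.mpr (Or.inl h.symm)) c2
          · exact absurd (List.mem_cons.mpr (Or.inl h.symm)) c1
          · exact List.mem_cons.mpr (Or.inl h.symm)
          · exact absurd (List.mem_cons.mpr (Or.inl h.symm)) c3
        have ht : gsrTail (fun x => (m :: rest).contains x) = "Q2095" := by
          simp [gsrTail, c1, c2, c3, c4]
        rw [ht]
        apply key _ c4
        intro y hy4 hym
        simp only [gsrOverlapKeys, List.mem_cons, List.not_mem_nil, or_false] at hy4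
        rcases hy4 with h | h | h | h <;> subst h
        · exact absurd hym c2
        · exact absurd hym c1
        · decide
        · exact absurd hym c3

-- ===== VERDICT (by name: the statement is the Claim_ definition above) =====
theorem get_subclass_root_spec : Claim_equal_get_subclass_root := by
  intro entity_id fm at_level _hdom hpre
  unfold Spec_get_subclass_root
  obtain ⟨hnd, -⟩ := hpre
  have hlk : ∀ kv ∈ fm, (PySem.Dict.mk fm).get? kv.1 = some kv.2 := by
    intro kv hkv
    exact PySem.Dict.get?_of_mem_items (d := PySem.Dict.mk fm) (by simpa using hkv) (by simpa using hnd)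
  have hc : ∀ k, (PySem.Dict.mk [("Q41176", false), ("Q1248784", false), ("Q2095", false), ("Q16521", false)] : PySem.Dict String Bool).contains k = gsrOverlapKeys.contains k := by
    intro k
    by_cases h : k ∈ gsrOverlapKeys
    · simp only [gsrOverlapKeys, List.mem_cons, List.not_mem_nil, or_false] at h
      rcases h with h | h | h | h <;> subst h <;> decide
    · have hr : gsrOverlapKeys.contains k = false := by simpa using h
      simp only [gsrOverlapKeys, List.mem_cons, List.not_mem_nil, or_false, not_or] at h
      obtain ⟨h1, h2, h3, h4⟩ := h
      rw [hr]
      simp [PySem.Dict.contains_mk, beq_eq_false_iff_ne.mpr (Ne.symm h1),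
        beq_eq_false_iff_ne.mpr (Ne.symm h2), beq_eq_false_iff_ne.mpr (Ne.symm h3),
        beq_eq_false_iff_ne.mpr (Ne.symm h4)]
  rw [get_subclass_root, gsrLoopA_eq_select entity_id fm at_level fm _ hlk hc]
  -- B's matches list is exactly A's filtered key list
  have hmatches : ((fm.foldl (fun idx kv => kv.2.foldl (gsrStep at_level kv.1) idx) PySem.Dict.empty).getD entity_id [])
      = (fm.filter (fun kv => gsrHitB entity_id kv.2 at_level kv.1)).map Prod.fst := by
    rw [gsrFoldMap entity_id at_level fm PySem.Dict.empty (by simpa using hnd) (by simp)]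
    simp only [PySem.Dict.getD_empty, List.nil_append]
    congr 1
    apply List.filter_congr
    intro kv _
    exact gsrHitX_eq entity_id at_level kv.1 kv.2
  rw [get_subclass_root_alt]
  simp only [hmatches]
  set ms := (fm.filter (fun kv => gsrHitB entity_id kv.2 at_level kv.1)).map Prod.fst with hms
  have hpred : (fun k => !(gsrPrio.contains k)) = (fun k => !(gsrOverlapKeys.contains k)) := by
    funext k; rw [gsrPrio_contains]
  rw [gsrSelect, hpred]
  cases hfind : ms.find? (fun k => !(gsrOverlapKeys.contains k)) with
  | some k => rfl
  | none =>
      have hoc0 : (fun x => (PySem.Dict.mk [("Q41176", false), ("Q1248784", false), ("Q2095", false), ("Q16521", false)] : PySem.Dict String Bool).getD x false || ms.contains x)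
          = (fun x => ms.contains x) := by
        funext x
        have hval : ((PySem.Dict.mk [("Q41176", false), ("Q1248784", false), ("Q2095", false), ("Q16521", false)] : PySem.Dict String Bool).get? x).getD false = false := by
          simp only [PySem.Dict.get?_mk_cons]
          split_ifs <;> simp [PySem.Dict.get?]
        rw [PySem.Dict.getD_eq_get?_getD, hval, Bool.false_or]
      rw [hoc0]
      have hall : ∀ x ∈ ms, x ∈ gsrOverlapKeys := by
        intro x hx
        have := List.find?_eq_none.mp hfind x hx
        simpa using this
      cases hmsc : ms with
      | nil => simp [gsrTail]
      | cons m rest =>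
          rw [gsrTail_eq_minBy m rest (hmsc ▸ hall)]
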